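-- pv_equiv track=rewrite | github.com/bsk-ps/bsk | api/src/transposition/columnar.py | word_to_key
-- ===== SOURCE A (Python) =====
-- def word_to_key(word: str) -> list[int]:
--     word = word.lower()
--     ordered_letters = sorted(list(word))
--     counter = dict(zip(list(word), [0 for _ in range(len(word))]))
--     output = [0 for _ in range(len(word))]
--     for i in range(len(word)):
--         output[i] = ordered_letters.index(word[i]) + counter[word[i]]
--         counter[word[i]] += 1
--
--     return output
-- ===== SOURCE B (Python) =====
-- def word_to_key(word: str) -> list[int]:
--     word = word.lower()
--     order = sorted(range(len(word)), key=lambda i: word[i])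
--     key = [0] * len(word)
--     for rank, i in enumerate(order):
--         key[i] = rank
--     return key
-- ===== Notes on version B (the rewrite author's own statement) =====
-- stated objective: faster
-- what changed: B computes the key as the inverse permutation of the stable argsort of the positions (sort the index list by character, then scatter each rank back to its index), instead of A's per-character ordered_letters.index scan plus running per-letter counters.
import Mathlib
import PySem

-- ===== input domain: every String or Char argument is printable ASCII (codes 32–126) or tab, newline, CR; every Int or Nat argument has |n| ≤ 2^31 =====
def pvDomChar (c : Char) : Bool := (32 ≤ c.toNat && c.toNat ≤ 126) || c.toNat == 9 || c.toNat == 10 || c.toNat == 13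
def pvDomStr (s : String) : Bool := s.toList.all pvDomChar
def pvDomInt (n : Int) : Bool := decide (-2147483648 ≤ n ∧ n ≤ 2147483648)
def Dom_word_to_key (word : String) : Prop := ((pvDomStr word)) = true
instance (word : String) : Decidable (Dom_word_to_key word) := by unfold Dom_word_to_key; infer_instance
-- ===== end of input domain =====

-- B builds the key as the inverse permutation of the stable argsort of the positions
-- (sort the index list by character, scatter each rank back), instead of A's per-character
-- ordered_letters.index scan plus running per-letter counters: asymptotically faster.

-- ===== PORT A =====
def word_to_key (word : String) : List Int :=
  let w := PySem.Chars.lower word.toList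
  let ordered_letters := PySem.List.sorted w (fun c => c) false
  let counter : PySem.Dict Char Int :=
    PySem.Dict.ofList (w.zip ((PySem.List.pyRange 0 (w.length : Int) 1).map (fun _ => (0 : Int))))
  let output : List Int := (PySem.List.pyRange 0 (w.length : Int) 1).map (fun _ => (0 : Int))
  let res := (PySem.List.pyRange 0 (w.length : Int) 1).foldl
    (fun (st : List Int × PySem.Dict Char Int) i =>
      let c := PySem.List.pyGetD w i ' '
      (PySem.List.pySetD st.1 i ((((PySem.List.index? ordered_letters c).getD 0 : Nat) : Int) + st.2.getD c 0),
       st.2.insert c (st.2.getD c 0 + 1)))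
    (output, counter)
  res.1

-- ===== PORT B =====
def word_to_key_alt (word : String) : List Int :=
  let w := PySem.Chars.lower word.toList
  let order := PySem.List.sorted (PySem.List.pyRange 0 (w.length : Int) 1)
    (fun i => PySem.List.pyGetD w i ' ') false
  let key : List Int := PySem.List.pyRepeat [0] (w.length : Int)
  (PySem.List.enumerate order).foldl (fun k p => PySem.List.pySetD k p.2 p.1) key

-- ===== PRECONDITION & SPEC =====
def Spec_word_to_key (word : String) (out : List Int) : Prop := out = word_to_key_alt word
instance (word : String) (out : List Int) : Decidable (Spec_word_to_key word out) := by unfold Spec_word_to_key; infer_instance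

-- ===== CLAIM (what is proved, stated in full; the proofs are below) =====
def Claim_equal_word_to_key : Prop := ∀ (word : String), Dom_word_to_key word → Spec_word_to_key word (word_to_key word)

-- ===== LEMMAS AND PROOFS =====

-- any list is the map of getD over range of its length
theorem map_getD_range_self {α : Type} (xs : List α) (d : α) :
    (List.range xs.length).map (fun i => xs.getD i d) = xs := by
  apply List.ext_getElem
  · simp
  · intro i h1 h2
    simp [List.getD_eq_getElem?_getD, List.getElem?_eq_getElem h2]

-- counting a disjunction of disjoint predicates splits
theorem countP_or_disjoint {α : Type} (l : List α) (p q : α → Bool)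
    (h : ∀ x ∈ l, ¬(p x = true ∧ q x = true)) :
    l.countP (fun x => p x || q x) = l.countP p + l.countP q := by
  induction l with
  | nil => simp
  | cons x t ih =>
    have hx := h x (by simp)
    have ht : ∀ y ∈ t, ¬(p y = true ∧ q y = true) := fun y hy => h y (by simp [hy])
    simp only [List.countP_cons, ih ht]
    cases hp : p x <;> cases hq : q x <;> simp_all <;> omega

-- counting over range n with a `m < i` guard is counting over range i
theorem countP_range_lt_and (n i : Nat) (hi : i ≤ n) (q : Nat → Bool) :
    (List.range n).countP (fun m => decide (m < i) && q m) = (List.range i).countP q := by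
  have hn : n = i + (n - i) := by omega
  rw [hn, List.range_add, List.countP_append]
  have h1 : (List.range i).countP (fun m => decide (m < i) && q m) = (List.range i).countP q := by
    apply List.countP_congr
    intro m hm
    simp [List.mem_range.mp hm]
  have h2 : ((List.range (n - i)).map (fun m => i + m)).countP
      (fun m => decide (m < i) && q m) = 0 := by
    rw [List.countP_eq_zero]
    intro a ha
    simp only [List.mem_map] at ha
    obtain ⟨m, _, rfl⟩ := ha
    simp [show ¬(i + m < i) by omega]
  rw [h1, h2]
  omega

-- first index of c in sorted(w) = number of characters of w strictly below c
theorem index_sorted_eq_countLt (w : List Char) (c : Char) (hc : c ∈ w) :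
    PySem.List.index? (PySem.List.sorted w (fun x => x) false) c
      = some (w.countP (fun d => decide (d < c))) := by
  have hcs : c ∈ PySem.List.sorted w (fun x => x) false :=
    (PySem.List.mem_sorted w (fun x => x) false c).mpr hc
  obtain ⟨k, hk⟩ := Option.isSome_iff_exists.mp
    ((PySem.List.index?_isSome_iff _ c).mpr hcs)
  obtain ⟨pre, suf, hs, hlen, hnotin⟩ := (PySem.List.index?_eq_some_iff _ c k).mp hk
  have hpw := PySem.List.sorted_pairwise w (fun x => x)
  rw [hs, List.pairwise_append] at hpw
  obtain ⟨hpre, hcsuf, hcross⟩ := hpw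
  have hperm := PySem.List.sorted_perm w (fun x => x) false
  have hcount : w.countP (fun d => decide (d < c))
      = (pre ++ c :: suf).countP (fun d => decide (d < c)) := by
    rw [← hs]; exact (hperm.countP_eq _).symm
  rw [List.countP_append, List.countP_cons] at hcount
  have h1 : pre.countP (fun d => decide (d < c)) = pre.length := by
    rw [List.countP_eq_length]
    intro a ha
    have hle : a ≤ c := hcross a ha c (by simp)
    have hne : a ≠ c := fun he => hnotin (he ▸ ha)
    simp [lt_of_le_of_ne hle hne]
  have h2 : suf.countP (fun d => decide (d < c)) = 0 := by
    rw [List.countP_eq_zero]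
    intro a ha
    have hca : c ≤ a := (List.pairwise_cons.mp hcsuf).1 a ha
    simp [not_lt.mpr hca]
  rw [hk]
  congr 1
  rw [hcount, h1, h2]
  simp
  omega

-- Reference computation of A's loop: emit f c + cnt c for each char, bumping cnt c.
def runKey (f : Char → Int) : List Char → (Char → Int) → List Int
  | [], _ => []
  | c :: r, cnt => (f c + cnt c) :: runKey f r (fun x => if x = c then cnt c + 1 else cnt x)

theorem runKey_congr (f g : Char → Int) (t : List Char) (cnt cnt' : Char → Int)
    (hf : ∀ c ∈ t, f c = g c) (hc : ∀ c ∈ t, cnt c = cnt' c) :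
    runKey f t cnt = runKey g t cnt' := by
  induction t generalizing cnt cnt' with
  | nil => rfl
  | cons c r ih =>
    have h1 : f c = g c := hf c (by simp)
    have h2 : cnt c = cnt' c := hc c (by simp)
    simp only [runKey, h1, h2]
    refine congrArg _ (ih _ _ (fun x hx => hf x (by simp [hx])) (fun x hx => ?_))
    by_cases h : x = c <;> simp [h, hc x (by simp [hx])]

-- closed form of runKey: position i gets f w[i] + cnt w[i] + (count of w[i] before i)
theorem runKey_eq_map (f : Char → Int) (t : List Char) (cnt : Char → Int) :
    runKey f t cnt = (List.range t.length).map
      (fun i => f (t.getD i ' ') + cnt (t.getD i ' ') + ((t.take i).count (t.getD i ' ') : Int)) := by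
  induction t generalizing cnt with
  | nil => simp [runKey]
  | cons c r ih =>
    rw [show (c :: r).length = r.length + 1 from rfl, List.range_succ_eq_map]
    simp only [List.map_cons, List.map_map]
    rw [runKey, ih]
    congr 1
    · simp
    refine List.map_congr_left (fun i _ => ?_)
    simp only [Function.comp, List.getD_cons_succ, List.take_succ_cons]
    by_cases hx : r.getD i ' ' = c
    · rw [hx, if_pos rfl, List.count_cons]
      simp only [beq_self_eq_true, if_true]
      push_cast
      ring
    · rw [if_neg hx, List.count_cons, if_neg (fun h => hx ((beq_iff_eq.mp h).symm))]
      simp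

-- A's indexed loop over range' produces runKey.
theorem loopA_spec (f : Char → Int) (w : List Char) (m : Nat) :
    ∀ (k : Nat) (out : List Int) (d : PySem.Dict Char Int),
      k + m = w.length → out.length = w.length →
      ((List.range' k m).foldl
        (fun (st : List Int × PySem.Dict Char Int) (j : Nat) =>
          (st.1.set j (f (w.getD j ' ') + st.2.getD (w.getD j ' ') 0),
           st.2.insert (w.getD j ' ') (st.2.getD (w.getD j ' ') 0 + 1)))
        (out, d)).1
      = out.take k ++ runKey f (w.drop k) (fun c => d.getD c 0) := by
  induction m with
  | zero =>
    intro k out d hk hout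
    have hk' : k = w.length := by omega
    subst hk'
    simp [List.drop_length, runKey, List.take_of_length_le (le_of_eq hout)]
  | succ m ih =>
    intro k out d hk hout
    have hkw : k < w.length := by omega
    have hko : k < out.length := by omega
    rw [List.range'_succ, List.foldl_cons]
    have hc : w.getD k ' ' = w[k] := List.getD_eq_getElem w ' ' hkw
    rw [ih (k+1) _ _ (by omega) (by simp [hout])]
    have hset : (out.set k (f (w.getD k ' ') + d.getD (w.getD k ' ') 0)).take (k+1)
        = out.take k ++ [f (w.getD k ' ') + d.getD (w.getD k ' ') 0] := by
      rw [List.set_eq_take_append_cons_drop, if_pos hko]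
      rw [show k + 1 = (out.take k).length + 1 by simp [List.length_take]; omega]
      rw [List.take_append]
      simp
    rw [hset, List.drop_eq_getElem_cons hkw, runKey, ← hc]
    rw [runKey_congr f f (w.drop (k+1)) _
          (fun x => if x = w.getD k ' ' then d.getD (w.getD k ' ') 0 + 1 else d.getD x 0)
          (fun _ _ => rfl)
          (fun x _ => PySem.Dict.getD_insert d _ x _ 0)]
    simp

-- All values of A's initial counter dict are 0, so every getD _ 0 is 0.
theorem getD_update_zeros (pairs : List (Char × Int)) :
    ∀ (d : PySem.Dict Char Int), (∀ c : Char, d.getD c 0 = 0) → (∀ p ∈ pairs, p.2 = 0) →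
    ∀ c : Char, (d.update pairs).getD c 0 = 0 := by
  induction pairs with
  | nil => intro d hd _ c; simpa [PySem.Dict.update] using hd c
  | cons p r ih =>
    intro d hd hp c
    have : d.update (p :: r) = (d.insert p.1 p.2).update r := by
      simp [PySem.Dict.update]
    rw [this]
    refine ih _ (fun x => ?_) (fun q hq => hp q (by simp [hq])) c
    rw [PySem.Dict.getD_insert]
    split
    · exact hp p (by simp)
    · exact hd x

-- A's initial counter dict (zipped with a zero list) reads 0 at every key.
theorem counter0_zero (w : List Char) (zs : List Int) (hz : ∀ z ∈ zs, z = 0) (c : Char) :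
    (PySem.Dict.ofList (w.zip zs)).getD c 0 = 0 := by
  simp only [PySem.Dict.ofList]
  refine getD_update_zeros _ PySem.Dict.empty (fun x => by simp [PySem.Dict.getD_empty]) ?_ c
  intro p hp
  exact hz p.2 (List.of_mem_zip hp).2

-- ---------- B-side machinery ----------

-- the character at an Int position
def keyf (w : List Char) (j : Int) : Char := PySem.List.pyGetD w j ' '

-- strict lexicographic order on positions by (character, position): B's stable argsort order
def Lb (w : List Char) (i j : Int) : Bool :=
  decide (keyf w i < keyf w j) || (keyf w i == keyf w j && decide (i < j))

theorem Lb_irrefl (w : List Char) (i : Int) : Lb w i i = false := by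
  simp [Lb]

theorem Lb_asymm (w : List Char) (i j : Int) (h : Lb w i j = true) : Lb w j i = false := by
  rw [Bool.eq_false_iff]
  intro h2
  simp only [Lb, Bool.or_eq_true, Bool.and_eq_true, decide_eq_true_eq, beq_iff_eq] at h h2
  rcases h with h | ⟨he, hij⟩ <;> rcases h2 with h2 | ⟨he2, hji⟩
  · exact absurd h2 (lt_asymm h)
  · exact absurd he2.symm (ne_of_lt h)
  · exact absurd he.symm (ne_of_lt h2)
  · omega

-- keyf is monotone along Lb
theorem keyf_le_of_Lb (w : List Char) (i j : Int) (h : Lb w i j = true) : keyf w i ≤ keyf w j := by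
  simp only [Lb, Bool.or_eq_true, Bool.and_eq_true, decide_eq_true_eq, beq_iff_eq] at h
  rcases h with h | ⟨he, _⟩
  · exact le_of_lt h
  · exact le_of_eq he

-- inserting a position larger than all accumulated ones keeps the list Lb-sorted (stability)
theorem insertBy_pairwise_Lb (w : List Char) (x : Int) :
    ∀ (acc : List Int), acc.Pairwise (fun a b => Lb w a b = true) → (∀ a ∈ acc, a < x) →
    (PySem.List.insertBy (fun a b => decide (keyf w a < keyf w b)) x acc).Pairwise
      (fun a b => Lb w a b = true) := by
  intro acc
  induction acc with
  | nil => intro _ _; simp [PySem.List.insertBy]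
  | cons y ys ih =>
    intro hacc hlt
    obtain ⟨hy, hys⟩ := List.pairwise_cons.mp hacc
    by_cases hb : keyf w x < keyf w y
    · have hstep : PySem.List.insertBy (fun a b => decide (keyf w a < keyf w b)) x (y :: ys)
          = x :: y :: ys := by simp [PySem.List.insertBy, hb]
      rw [hstep]
      refine List.pairwise_cons.mpr ⟨?_, hacc⟩
      intro z hz
      rcases List.mem_cons.mp hz with rfl | hz'
      · simp [Lb, hb]
      · have h1 : keyf w y ≤ keyf w z := keyf_le_of_Lb w y z (hy z hz')
        have h2 : keyf w x < keyf w z := lt_of_lt_of_le hb h1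
        simp [Lb, h2]
    · have hstep : PySem.List.insertBy (fun a b => decide (keyf w a < keyf w b)) x (y :: ys)
          = y :: PySem.List.insertBy (fun a b => decide (keyf w a < keyf w b)) x ys := by
        simp [PySem.List.insertBy, hb]
      rw [hstep]
      refine List.pairwise_cons.mpr ⟨?_, ih hys (fun a ha => hlt a (by simp [ha]))⟩
      intro z hz
      rcases (PySem.List.mem_insertBy _ x z ys).mp hz with rfl | hz'
      · have hyx : y < z := hlt y (by simp)
        rcases lt_or_eq_of_le (not_lt.mp hb) with h | h
        · simp [Lb, h]
        · simp [Lb, h, hyx]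
      · exact hy z hz'

theorem foldl_insertBy_pairwise_Lb (w : List Char) :
    ∀ (xs acc : List Int), xs.Pairwise (· < ·) →
    acc.Pairwise (fun a b => Lb w a b = true) → (∀ a ∈ acc, ∀ x ∈ xs, a < x) →
    (xs.foldl (fun acc x => PySem.List.insertBy (fun a b => decide (keyf w a < keyf w b)) x acc)
      acc).Pairwise (fun a b => Lb w a b = true) := by
  intro xs
  induction xs with
  | nil => intro acc _ hacc _; simpa using hacc
  | cons x t ih =>
    intro acc hxs hacc hlt
    obtain ⟨hx, ht⟩ := List.pairwise_cons.mp hxs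
    rw [List.foldl_cons]
    refine ih _ ht (insertBy_pairwise_Lb w x acc hacc (fun a ha => hlt a ha x (by simp))) ?_
    intro a ha y hy
    rcases (PySem.List.mem_insertBy _ x a acc).mp ha with rfl | ha'
    · exact hx y hy
    · exact hlt a ha' y (by simp [hy])

-- in an Lb-sorted list, the index of i is the number of positions Lb-below i
theorem index_of_pairwise_Lb (w : List Char) (ord rng : List Int)
    (hp : ord.Pairwise (fun a b => Lb w a b = true)) (hperm : ord.Perm rng)
    (i : Int) (hi : i ∈ ord) :
    PySem.List.index? ord i = some (rng.countP (fun j => Lb w j i)) := by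
  obtain ⟨k, hk⟩ := Option.isSome_iff_exists.mp ((PySem.List.index?_isSome_iff ord i).mpr hi)
  obtain ⟨pre, suf, hs, hlen, hnotin⟩ := (PySem.List.index?_eq_some_iff ord i k).mp hk
  rw [hs, List.pairwise_append] at hp
  obtain ⟨hpre, hisuf, hcross⟩ := hp
  have hcnt : rng.countP (fun j => Lb w j i) = (pre ++ i :: suf).countP (fun j => Lb w j i) := by
    rw [← hs]; exact (hperm.countP_eq _).symm
  have h1 : pre.countP (fun j => Lb w j i) = pre.length := by
    rw [List.countP_eq_length]
    intro a ha
    exact hcross a ha i (by simp)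
  have h2 : suf.countP (fun j => Lb w j i) = 0 := by
    rw [List.countP_eq_zero]
    intro a ha
    have hia : Lb w i a = true := (List.pairwise_cons.mp hisuf).1 a ha
    simp [Lb_asymm w i a hia]
  rw [hk]
  congr 1
  rw [hcnt, List.countP_append, List.countP_cons, h1, h2, Lb_irrefl]
  simp
  omega

-- the scatter loop `for rank, i in enumerate(order): key[i] = rank` inverts the permutation
theorem scatter_spec :
    ∀ (ord : List Int) (k : Int) (out : List Int),
    ord.Nodup → (∀ j ∈ ord, 0 ≤ j ∧ j.toNat < out.length) →
    (PySem.List.enumerate ord k).foldl (fun o p => PySem.List.pySetD o p.2 p.1) out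
    = (List.range out.length).map (fun (i : Nat) =>
        match PySem.List.index? ord (i : Int) with
        | some r => k + (r : Int)
        | none => out.getD i 0) := by
  intro ord
  induction ord with
  | nil =>
    intro k out _ _
    have hnone : ∀ i : Nat, (match PySem.List.index? ([] : List Int) (i : Int) with
        | some r => k + (r : Int) | none => out.getD i 0) = out.getD i 0 := by
      intro i
      simp [PySem.List.index?]
    rw [List.map_congr_left (fun i _ => hnone i), map_getD_range_self]
    simp [PySem.List.enumerate_nil]
  | cons j t ih =>
    intro k out hnd hrange
    obtain ⟨hj0, hjlen⟩ := hrange j (by simp)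
    have hjt : j ∉ t := (List.nodup_cons.mp hnd).1
    rw [PySem.List.enumerate_cons, List.foldl_cons]
    have hset : PySem.List.pySetD out j k = out.set j.toNat k := by
      rw [PySem.List.pySetD_of_nonneg]
      exact hj0
    simp only [hset]
    rw [ih (k + 1) (out.set j.toNat k) (List.nodup_cons.mp hnd).2
          (fun a ha => by simpa using hrange a (by simp [ha]))]
    simp only [List.length_set]
    refine List.map_congr_left (fun i hi => ?_)
    have hin : i < out.length := List.mem_range.mp hi
    by_cases hij : (i : Int) = j
    · have hji : j.toNat = i := by omega
      have hidx1 : PySem.List.index? (j :: t) (i : Int) = some 0 := by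
        rw [← hij]
        exact PySem.List.index?_cons_self _ _
      have hidx2 : PySem.List.index? t (i : Int) = none :=
        (PySem.List.index?_eq_none_iff t _).mpr (by rw [← hij] at hjt; exact hjt)
      rw [hidx1, hidx2]
      simp only [hji]
      simp [List.getD_eq_getElem?_getD, hin]
    · have hne : j ≠ (i : Int) := fun h => hij h.symm
      rw [PySem.List.index?_cons_of_ne t hne]
      cases h : PySem.List.index? t (i : Int) with
      | some r =>
        show k + 1 + (r : Int) = k + ((r + 1 : Nat) : Int)
        push_cast
        ring
      | none =>
        show (out.set j.toNat k).getD i 0 = out.getD i 0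
        have hji : j.toNat ≠ i := by omega
        simp [List.getD_eq_getElem?_getD, hji]

-- ===== VERDICT (by name: the statement is the Claim_ definition above) =====
theorem word_to_key_spec : Claim_equal_word_to_key := by
  intro word _
  unfold Spec_word_to_key word_to_key word_to_key_alt
  simp only []
  set w := PySem.Chars.lower word.toList with hw
  set sA := PySem.List.sorted w (fun c => c) false with hsA
  -- A side: reduce the pyRange fold to a range' fold and apply loopA_spec
  have hA :
      ((PySem.List.pyRange 0 (w.length : Int) 1).foldl
        (fun (st : List Int × PySem.Dict Char Int) i =>
          (PySem.List.pySetD st.1 i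
            ((((PySem.List.index? sA (PySem.List.pyGetD w i ' ')).getD 0 : Nat) : Int)
              + st.2.getD (PySem.List.pyGetD w i ' ') 0),
           st.2.insert (PySem.List.pyGetD w i ' ')
            (st.2.getD (PySem.List.pyGetD w i ' ') 0 + 1)))
        ((PySem.List.pyRange 0 (w.length : Int) 1).map (fun _ => (0 : Int)),
         PySem.Dict.ofList (w.zip ((PySem.List.pyRange 0 (w.length : Int) 1).map (fun _ => (0 : Int)))))).1
      = runKey (fun c => (((PySem.List.index? sA c).getD 0 : Nat) : Int)) w (fun _ => 0) := by
    rw [PySem.List.pyRange_zero_natCast, List.foldl_map]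
    simp only [PySem.List.pyGetD_natCast, PySem.List.pySetD_natCast]
    rw [List.range_eq_range']
    rw [loopA_spec (fun c => (((PySem.List.index? sA c).getD 0 : Nat) : Int)) w w.length 0 _ _
          (by omega) (by simp)]
    simp only [List.take_zero, List.drop_zero, List.nil_append]
    exact runKey_congr _ _ w _ _ (fun _ _ => rfl)
      (fun c _ => counter0_zero w _ (by
        intro z hz
        simp only [List.mem_map] at hz
        obtain ⟨_, _, h⟩ := hz
        exact h.symm) c)
  rw [hA, runKey_eq_map]
  -- B side
  set rng := PySem.List.pyRange 0 (w.length : Int) 1 with hrng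
  set ord := PySem.List.sorted rng (fun i => PySem.List.pyGetD w i ' ') false with hord
  have hperm : ord.Perm rng := PySem.List.sorted_perm _ _ _
  have hmemord : ∀ j : Int, j ∈ ord ↔ (0 ≤ j ∧ j < (w.length : Int)) := by
    intro j
    rw [hperm.mem_iff, hrng, PySem.List.mem_pyRange_one]
  have hnd : ord.Nodup := hperm.nodup_iff.mpr (PySem.List.nodup_pyRange_one 0 _)
  have hkey : PySem.List.pyRepeat [(0 : Int)] (w.length : Int) = List.replicate w.length 0 := by
    rw [PySem.List.pyRepeat_singleton]
    simp
  rw [hkey, scatter_spec ord 0 (List.replicate w.length 0) hnd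
        (fun j hj => by
          obtain ⟨h1, h2⟩ := (hmemord j).mp hj
          refine ⟨h1, ?_⟩
          simp only [List.length_replicate]
          omega)]
  simp only [List.length_replicate]
  refine List.map_congr_left (fun i hi => ?_)
  have hin : i < w.length := List.mem_range.mp hi
  set c := w.getD i ' ' with hc
  have hcw : c ∈ w := by
    rw [hc, List.getD_eq_getElem w ' ' hin]
    exact List.getElem_mem hin
  -- evaluate A's term
  have hidxA : PySem.List.index? sA c = some (w.countP (fun d => decide (d < c))) :=
    index_sorted_eq_countLt w c hcw
  -- evaluate B's term
  have hiord : (i : Int) ∈ ord := (hmemord _).mpr (by constructor <;> omega)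
  have hidxB : PySem.List.index? ord (i : Int)
      = some (rng.countP (fun j => Lb w j (i : Int))) :=
    index_of_pairwise_Lb w ord rng
      (by
        rw [hord, PySem.List.sorted_eq_foldl_insertBy]
        exact foldl_insertBy_pairwise_Lb w rng []
          (PySem.List.pairwise_lt_pyRange_one 0 _) List.Pairwise.nil (by simp))
      hperm (i : Int) hiord
  rw [hidxB, hidxA]
  simp only [Option.getD_some]
  -- reduce B's count over rng to counts over range
  have hcntB : rng.countP (fun j => Lb w j (i : Int))
      = (List.range w.length).countP (fun m => decide (w.getD m ' ' < c))
        + (List.range i).countP (fun m => w.getD m ' ' == c) := by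
    rw [hrng, PySem.List.pyRange_zero_natCast, List.countP_map]
    have hcongr : ∀ m ∈ List.range w.length,
        ((fun j => Lb w j (i : Int)) ∘ (fun k : Nat => (k : Int))) m
        = (decide (w.getD m ' ' < c) || (w.getD m ' ' == c && decide (m < i))) := by
      intro m _
      simp only [Function.comp, Lb, keyf, PySem.List.pyGetD_natCast, hc, Nat.cast_lt]
    rw [List.countP_congr (fun m hm => by rw [hcongr m hm])]
    rw [countP_or_disjoint _ _ _ (by
      intro m _
      rintro ⟨h1, h2⟩
      simp only [decide_eq_true_eq, Bool.and_eq_true, beq_iff_eq] at h1 h2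
      exact absurd h2.1 (ne_of_lt h1))]
    congr 1
    rw [List.countP_congr (fun m _ => by rw [Bool.and_comm]), countP_range_lt_and _ i (by omega)]
  rw [hcntB]
  -- reduce A's two counts to the same counts over range
  have hA1 : w.countP (fun d => decide (d < c))
      = (List.range w.length).countP (fun m => decide (w.getD m ' ' < c)) := by
    conv_lhs => rw [← map_getD_range_self w ' ']
    rw [List.countP_map]
    rfl
  have hA2 : (w.take i).count c = (List.range i).countP (fun m => w.getD m ' ' == c) := by
    have htake : w.take i = (List.range i).map (fun m => w.getD m ' ') := by
      conv_lhs => rw [← map_getD_range_self w ' ']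
      rw [← List.map_take, List.take_range, Nat.min_eq_left (le_of_lt hin)]
    rw [htake, List.count_eq_countP, List.countP_map]
    rfl
  rw [hA1, hA2]
  push_cast
  ring
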